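-- pv_equiv track=rewrite | github.com/0xadrdev/python | exaEnero15.py | columnas_repetidas
-- ===== SOURCE A (Python) =====
-- def columnas_repetidas(matriz,n):
--     columnaUno = []
--     columnasRepetidas = []
--
--     for i in range(len(matriz)):
--         columnaUno.append(matriz[i][n])
--
--     for j in range(len(matriz[0])):
--         columnaDos = []
--         for i in range(len(matriz)):
--             columnaDos.append(matriz[i][j])
--         if columnaDos == columnaUno and n != j:
--             columnasRepetidas.append(i)
--
--     return columnasRepetidas
-- ===== SOURCE B (Python) =====
-- def columnas_repetidas(matriz, n):
--     # Group the column indices by column content in one pass, then read off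
--     # the group that column n belongs to.
--     groups = {}
--     for j in range(len(matriz[0])):
--         groups.setdefault(tuple(row[j] for row in matriz), []).append(j)
--     target = tuple(row[n] for row in matriz)
--     return [j for j in groups.get(target, ()) if j != n]
-- ===== Notes on version B (the rewrite author's own statement) =====
-- stated objective: alternative
-- what changed: B groups all column indices by column content in a single dict pass and reads off the group containing column n, instead of A's outer loop that rebuilds each column element-by-element and compares it against column n; B also returns the matching column indices j rather than A's leftover loop variable.
-- intended difference: On matrices with some column j equal to column n where j != n and j != len(matriz)-1, A appends the leftover inner-loop variable i (always len(matriz)-1) for every match and so returns [len(matriz)-1]*k, while B returns the list of matching column indices j, which is what a function reporting repeated columns is meant to return. — e.g. on columnas_repetidas([[1, 1]], 0): A returns [0], B returns [1]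
import Mathlib
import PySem

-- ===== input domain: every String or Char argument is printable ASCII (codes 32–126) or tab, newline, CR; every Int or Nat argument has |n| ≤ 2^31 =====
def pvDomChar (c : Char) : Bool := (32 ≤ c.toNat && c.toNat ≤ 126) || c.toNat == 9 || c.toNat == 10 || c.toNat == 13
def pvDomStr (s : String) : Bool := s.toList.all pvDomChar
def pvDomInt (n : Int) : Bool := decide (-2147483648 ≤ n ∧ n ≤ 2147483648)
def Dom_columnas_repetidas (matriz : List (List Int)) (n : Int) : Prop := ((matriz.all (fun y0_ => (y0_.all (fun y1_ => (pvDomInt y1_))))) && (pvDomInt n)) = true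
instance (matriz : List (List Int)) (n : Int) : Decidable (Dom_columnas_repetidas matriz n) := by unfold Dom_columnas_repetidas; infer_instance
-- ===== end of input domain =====

-- B groups column indices by column content in one dict pass instead of A's
-- per-column rebuild-and-compare, and returns the matching column indices
-- (A appends the leftover loop variable instead — stated as D_ below).

-- ===== PORT A =====
-- Literal port of A: first loop builds column n; the outer loop rebuilds each column j
-- and, on a match with n ≠ j, appends the leftover inner-loop variable i, whose value
-- after the inner loop is len(matriz) - 1 (matriz is nonempty under Pre_).
def columnas_repetidas (matriz : List (List Int)) (n : Int) : List Int :=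
  let columnaUno : List Int :=
    (PySem.List.pyRange 0 (matriz.length : Int) 1).foldl
      (fun acc i => acc ++ [PySem.List.pyGetD (PySem.List.pyGetD matriz i []) n 0]) []
  (PySem.List.pyRange 0 ((PySem.List.pyGetD matriz 0 []).length : Int) 1).foldl
    (fun acc j =>
      let columnaDos : List Int :=
        (PySem.List.pyRange 0 (matriz.length : Int) 1).foldl
          (fun acc2 i => acc2 ++ [PySem.List.pyGetD (PySem.List.pyGetD matriz i []) j 0]) []
      if columnaDos = columnaUno ∧ n ≠ j then acc ++ [(matriz.length : Int) - 1] else acc) []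

-- ===== PORT B =====
-- Port of Source B: build a dict mapping each column (as a list) to the list of indices
-- where it occurs (setdefault(..,[]).append(j) is Dict.modify with default []),
-- then look up column n's group and drop n itself.
def columnas_repetidas_alt (matriz : List (List Int)) (n : Int) : List Int :=
  let groups : PySem.Dict (List Int) (List Int) :=
    (PySem.List.pyRange 0 ((PySem.List.pyGetD matriz 0 []).length : Int) 1).foldl
      (fun d j => d.modify (matriz.map (fun row => PySem.List.pyGetD row j 0)) [] (· ++ [j]))
      PySem.Dict.empty
  let target : List Int := matriz.map (fun row => PySem.List.pyGetD row n 0)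
  (groups.getD target []).filter (fun j => j ≠ n)

-- ===== PRECONDITION & SPEC =====
-- Pre_ excludes exactly the inputs where the Python A raises IndexError: an empty
-- matrix (matriz[0]), a row for which column index n is out of range, or a row
-- shorter than the first row (the outer loop reads matriz[i][j] for j < len(matriz[0])).
def Pre_columnas_repetidas (matriz : List (List Int)) (n : Int) : Prop :=
  matriz ≠ [] ∧ ∀ row ∈ matriz,
    PySem.Raise.InRange row.length n ∧ (matriz.headD []).length ≤ row.length
instance (matriz : List (List Int)) (n : Int) : Decidable (Pre_columnas_repetidas matriz n) := by
  unfold Pre_columnas_repetidas; infer_instance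

def pvWitness_columnas_repetidas : List (List Int) × Int := ([[1, 2, 1], [3, 0, 3]], 0)

-- On matrices with some column j equal to column n where j ≠ n and j ≠ len(matriz)-1,
-- A appends the leftover inner-loop variable i (always len(matriz)-1) for every match and
-- so returns [len(matriz)-1]*k, while B returns the list of matching column indices j,
-- which is what a function reporting repeated columns is meant to return.
def D_columnas_repetidas (matriz : List (List Int)) (n : Int) : Prop :=
  ∃ j ∈ List.range (matriz.headD []).length,
    (∀ row ∈ matriz, row[j]? = PySem.List.pyGet? row n)
    ∧ n ≠ (j : Int) ∧ (j : Int) ≠ (matriz.length : Int) - 1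
instance (matriz : List (List Int)) (n : Int) : Decidable (D_columnas_repetidas matriz n) := by
  unfold D_columnas_repetidas; infer_instance

def Spec_columnas_repetidas (matriz : List (List Int)) (n : Int) (out : List Int) : Prop :=
  ¬ D_columnas_repetidas matriz n → out = columnas_repetidas_alt matriz n
instance (matriz : List (List Int)) (n : Int) (out : List Int) : Decidable (Spec_columnas_repetidas matriz n out) := by unfold Spec_columnas_repetidas; infer_instance

def pvDiffWitness_columnas_repetidas : List (List Int) × Int := ([[1, 1]], 0)
def pvDiffWitnessOut_columnas_repetidas : (List Int) × (List Int) := ([0], [1])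

-- ===== CLAIM (what is proved, stated in full; the proofs are below) =====
def Claim_unchanged_columnas_repetidas : Prop := ∀ (matriz : List (List Int)) (n : Int), Dom_columnas_repetidas matriz n → Pre_columnas_repetidas matriz n → Spec_columnas_repetidas matriz n (columnas_repetidas matriz n)
def Claim_changed_columnas_repetidas : Prop := Dom_columnas_repetidas (pvDiffWitness_columnas_repetidas.1) (pvDiffWitness_columnas_repetidas.2) ∧ Pre_columnas_repetidas (pvDiffWitness_columnas_repetidas.1) (pvDiffWitness_columnas_repetidas.2) ∧ D_columnas_repetidas (pvDiffWitness_columnas_repetidas.1) (pvDiffWitness_columnas_repetidas.2) ∧ columnas_repetidas (pvDiffWitness_columnas_repetidas.1) (pvDiffWitness_columnas_repetidas.2) = pvDiffWitnessOut_columnas_repetidas.1 ∧ columnas_repetidas_alt (pvDiffWitness_columnas_repetidas.1) (pvDiffWitness_columnas_repetidas.2) = pvDiffWitnessOut_columnas_repetidas.2 ∧ pvDiffWitnessOut_columnas_repetidas.1 ≠ pvDiffWitnessOut_columnas_repetidas.2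
def Claim_exact_columnas_repetidas : Prop := ∀ (matriz : List (List Int)) (n : Int), Dom_columnas_repetidas matriz n → Pre_columnas_repetidas matriz n → D_columnas_repetidas matriz n → columnas_repetidas matriz n ≠ columnas_repetidas_alt matriz n

-- ===== LEMMAS AND PROOFS =====

-- A's column-building index loop equals a direct map over the rows.
theorem colLoop_eq_map (matriz : List (List Int)) (k : Int) :
    (PySem.List.pyRange 0 (matriz.length : Int) 1).foldl
      (fun acc i => acc ++ [PySem.List.pyGetD (PySem.List.pyGetD matriz i []) k 0]) []
      = matriz.map (fun row => PySem.List.pyGetD row k 0) := by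
  rw [PySem.List.foldl_pyRange_pyGetD' (xs := matriz)
    (f := fun acc row => acc ++ [PySem.List.pyGetD row k 0]) (d := []) (init := []) (a := 0) (by norm_num)]
  simp
  induction matriz with
  | nil => simp
  | cons h t ih => simp [ih]

-- Both ports compute the same filtered index list; A maps it to the constant
-- len(matriz)-1, B returns it as is.
theorem ports_as_filter (matriz : List (List Int)) (n : Int) :
    (columnas_repetidas matriz n
      = ((PySem.List.pyRange 0 ((PySem.List.pyGetD matriz 0 []).length : Int) 1).filter
          (fun j => decide (matriz.map (fun row => PySem.List.pyGetD row j 0)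
              = matriz.map (fun row => PySem.List.pyGetD row n 0) ∧ n ≠ j))).map
          (fun _ => (matriz.length : Int) - 1))
    ∧ columnas_repetidas_alt matriz n
      = (PySem.List.pyRange 0 ((PySem.List.pyGetD matriz 0 []).length : Int) 1).filter
          (fun j => decide (matriz.map (fun row => PySem.List.pyGetD row j 0)
              = matriz.map (fun row => PySem.List.pyGetD row n 0) ∧ n ≠ j)) := by
  constructor
  · unfold columnas_repetidas
    simp only [colLoop_eq_map]
    rw [PySem.List.foldl_append_ite
      (p := fun j => matriz.map (fun row => PySem.List.pyGetD row j 0)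
          = matriz.map (fun row => PySem.List.pyGetD row n 0) ∧ n ≠ j)
      (f := fun _ => (matriz.length : Int) - 1)]
    simp
  · unfold columnas_repetidas_alt
    dsimp only
    rw [show (fun (d : PySem.Dict (List Int) (List Int)) (j : Int) =>
          d.modify (matriz.map (fun row => PySem.List.pyGetD row j 0)) [] (· ++ [j]))
        = (fun d j => (fun d (p : List Int × Int) => d.modify p.1 [] (· ++ [p.2])) d
            ((fun j => (matriz.map (fun row => PySem.List.pyGetD row j 0), j)) j)) from rfl,
      ← List.foldl_map (f := fun j => (matriz.map (fun row => PySem.List.pyGetD row j 0), j))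
        (g := fun (d : PySem.Dict (List Int) (List Int)) (p : List Int × Int) => d.modify p.1 [] (· ++ [p.2]))
        (l := PySem.List.pyRange 0 ((PySem.List.pyGetD matriz 0 []).length : Int) 1)
        (init := PySem.Dict.empty),
      PySem.Dict.getD_foldl_modify_append]
    have hempty : (PySem.Dict.empty : PySem.Dict (List Int) (List Int)).getD
        (matriz.map (fun row => PySem.List.pyGetD row n 0)) [] = [] := rfl
    rw [hempty, List.nil_append, List.filter_map]
    simp only [List.filter_filter]
    rw [List.filter_map, List.map_map]
    simp only [Function.comp_def, List.map_id']
    apply List.filter_congr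
    intro j _
    by_cases h : matriz.map (fun row => PySem.List.pyGetD row j 0)
        = matriz.map (fun row => PySem.List.pyGetD row n 0) <;>
      by_cases hn : n = j <;> simp [h, hn, ne_comm]

-- Under Pre_, D_ (stated row-wise over the input) coincides with the filter
-- condition both ports compute with.
theorem D_iff_filter (matriz : List (List Int)) (n : Int)
    (hpre : Pre_columnas_repetidas matriz n) :
    D_columnas_repetidas matriz n ↔
    ∃ j ∈ PySem.List.pyRange 0 ((PySem.List.pyGetD matriz 0 []).length : Int) 1,
      matriz.map (fun row => PySem.List.pyGetD row j 0)
        = matriz.map (fun row => PySem.List.pyGetD row n 0)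
      ∧ n ≠ j ∧ j ≠ (matriz.length : Int) - 1 := by
  obtain ⟨hne, hrows⟩ := hpre
  have hhead : PySem.List.pyGetD matriz 0 [] = matriz.headD [] := by
    cases matriz with
    | nil => rfl
    | cons a l => exact PySem.List.pyGetD_zero_cons a l []
  have hcoleq : ∀ (j : Nat), j < (matriz.headD []).length →
      ((∀ row ∈ matriz, row[j]? = PySem.List.pyGet? row n) ↔
        matriz.map (fun row => PySem.List.pyGetD row (j : Int) 0)
          = matriz.map (fun row => PySem.List.pyGetD row n 0)) := by
    intro j hj
    rw [List.map_inj_left]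
    apply forall_congr'; intro row
    apply imp_congr_right; intro hr
    obtain ⟨hin, hlen⟩ := hrows row hr
    have hjlen : j < row.length := lt_of_lt_of_le hj hlen
    obtain ⟨x, hx⟩ : ∃ x, PySem.List.pyGet? row n = some x := by
      cases hget : PySem.List.pyGet? row n with
      | none => exact absurd ((PySem.List.pyGet?_eq_none_iff row n).mp hget) (by simpa using hin)
      | some x => exact ⟨x, rfl⟩
    have hDn : PySem.List.pyGetD row n 0 = x := by
      simp [PySem.List.pyGetD, hx]
    have hDj : PySem.List.pyGetD row (j : Int) 0 = row[j] :=
      PySem.List.pyGetD_ofNat row j 0 hjlen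
    rw [hx, hDn, hDj, List.getElem?_eq_getElem hjlen, Option.some_inj]
  constructor
  · rintro ⟨j, hj, hcol, hnj, hjl⟩
    rw [List.mem_range] at hj
    refine ⟨(j : Int), ?_, (hcoleq j hj).mp hcol, hnj, hjl⟩
    rw [PySem.List.mem_pyRange_one, hhead]
    exact ⟨by positivity, by exact_mod_cast hj⟩
  · rintro ⟨j, hj, hcol, hnj, hjl⟩
    rw [PySem.List.mem_pyRange_one, hhead] at hj
    obtain ⟨hj0, hjm⟩ := hj
    refine ⟨j.toNat, List.mem_range.mpr (by omega), ?_, by omega, by omega⟩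
    have hcast : ((j.toNat : Nat) : Int) = j := Int.toNat_of_nonneg hj0
    exact (hcoleq j.toNat (by omega)).mpr (by rw [hcast]; exact hcol)

theorem columnas_repetidas_spec : Claim_unchanged_columnas_repetidas := by
  intro matriz n _ hpre hD
  rw [D_iff_filter matriz n hpre] at hD
  obtain ⟨hA, hB⟩ := ports_as_filter matriz n
  rw [hA, hB]
  have hall : ∀ j ∈ (PySem.List.pyRange 0 ((PySem.List.pyGetD matriz 0 []).length : Int) 1).filter
      (fun j => decide (matriz.map (fun row => PySem.List.pyGetD row j 0)
          = matriz.map (fun row => PySem.List.pyGetD row n 0) ∧ n ≠ j)),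
      j = (matriz.length : Int) - 1 := by
    intro j hj
    rw [List.mem_filter] at hj
    obtain ⟨hjr, hjp⟩ := hj
    have := of_decide_eq_true hjp
    by_contra hne
    exact hD ⟨j, hjr, this.1, this.2, hne⟩
  calc _ = (List.filter _ _).map id := List.map_congr_left (fun j hj => (hall j hj).symm)
    _ = _ := List.map_id _

theorem columnas_repetidas_changed : Claim_changed_columnas_repetidas := by
  unfold Claim_changed_columnas_repetidas; decide

theorem columnas_repetidas_tight : Claim_exact_columnas_repetidas := by
  intro matriz n _ hpre hD heq
  rw [D_iff_filter matriz n hpre] at hD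
  obtain ⟨j, hjr, hmatch, hnj, hjl⟩ := hD
  obtain ⟨hA, hB⟩ := ports_as_filter matriz n
  rw [hA, hB] at heq
  have hjL : j ∈ (PySem.List.pyRange 0 ((PySem.List.pyGetD matriz 0 []).length : Int) 1).filter
      (fun j => decide (matriz.map (fun row => PySem.List.pyGetD row j 0)
          = matriz.map (fun row => PySem.List.pyGetD row n 0) ∧ n ≠ j)) :=
    List.mem_filter.mpr ⟨hjr, decide_eq_true ⟨hmatch, hnj⟩⟩
  rw [← heq] at hjL
  obtain ⟨a, _, ha⟩ := List.mem_map.mp hjL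
  exact hjl ha.symm

-- ===== VERDICT =====
-- (theorems above are stated by name; nothing further)
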